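-- pv_equiv track=rewrite | github.com/david-a-jones/HashAnalysis | hasher.py | foldHash
-- ===== SOURCE A (Python) =====
-- def foldHash(key, m):
-- 	bytes = key.encode()
-- 	numOfBytes = len(bytes)
-- 	totalSum = 0
-- 	i = 0
-- 	while i < numOfBytes:
-- 		try:
-- 			b1 = bytes[i] << 24
-- 		except IndexError:
-- 			b1 = 0
-- 		try:
-- 			b2 = bytes[i+1] << 16
-- 		except IndexError:
-- 			b2 = 0
-- 		try:
-- 			b3 = bytes[i+2] << 8
-- 		except IndexError:
-- 			b3 = 0
-- 		try:
-- 			b4 = bytes[i+3]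
-- 		except IndexError:
-- 			b4 = 0
-- 		bytesSum = b1 + b2 + b3 + b4
-- 		totalSum = totalSum + bytesSum
-- 		i = i + 4
-- 	return totalSum % m
-- ===== SOURCE B (Python) =====
-- def foldHash(key, m):
--     total = 0
--     for i, byte in enumerate(key.encode()):
--         total += byte << ((3 - (i % 4)) * 8)
--     return total % m
-- ===== Notes on version B (the rewrite author's own statement) =====
-- stated objective: simpler
-- what changed: Replaces the group-of-4 while loop with its four try/except index probes by a single flat pass over the bytes, deriving each byte's shift (24/16/8/0) from its position modulo 4.
import Mathlib
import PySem

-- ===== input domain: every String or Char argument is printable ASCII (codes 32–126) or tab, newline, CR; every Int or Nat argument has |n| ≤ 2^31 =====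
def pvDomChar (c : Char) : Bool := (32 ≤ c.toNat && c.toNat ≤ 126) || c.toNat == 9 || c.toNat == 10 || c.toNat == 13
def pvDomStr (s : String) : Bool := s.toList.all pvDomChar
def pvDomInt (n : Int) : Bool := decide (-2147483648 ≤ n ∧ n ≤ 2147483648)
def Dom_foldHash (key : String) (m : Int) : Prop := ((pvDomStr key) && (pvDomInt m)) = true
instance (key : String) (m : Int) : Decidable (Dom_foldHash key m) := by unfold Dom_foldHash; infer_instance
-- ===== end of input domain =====

-- B replaces A's group-of-4 loop with four try/except index probes by one flat per-byte
-- pass whose shift (24/16/8/0) is derived from the byte's position mod 4; same result, simpler.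


-- ===== PORT A =====
-- key.encode(): on the ASCII domain the byte values are exactly the characters' code points.
def pyEncode (key : String) : List Int := key.toList.map (fun c => (c.toNat : Int))

-- the while loop: i steps by 4; each bytes[i+k] is a try/except returning 0 on IndexError
def foldHashLoop (bs : List Int) (i : Nat) (acc : Int) : Int :=
  if _h : i < bs.length then
    foldHashLoop bs (i + 4)
      (acc + ((PySem.List.pyGet? bs (i : Int)).getD 0 <<< (24 : Nat)
            + (PySem.List.pyGet? bs ((i : Int) + 1)).getD 0 <<< (16 : Nat)
            + (PySem.List.pyGet? bs ((i : Int) + 2)).getD 0 <<< (8 : Nat)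
            + (PySem.List.pyGet? bs ((i : Int) + 3)).getD 0))
  else acc
termination_by bs.length - i

def foldHash (key : String) (m : Int) : Int :=
  PySem.Int.mod (foldHashLoop (pyEncode key) 0 0) m

-- ===== PORT B =====
def foldHash_alt (key : String) (m : Int) : Int :=
  let total := (PySem.List.enumerate (pyEncode key)).foldl
    (fun (total : Int) (ib : Int × Int) => total + ib.2 <<< (((3 - PySem.Int.mod ib.1 4) * 8).toNat)) 0
  PySem.Int.mod total m

-- ===== PRECONDITION & SPEC =====
-- Python's '%' raises ZeroDivisionError when m = 0 (in both A and B).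
def Pre_foldHash (key : String) (m : Int) : Prop := m ≠ 0
instance (key : String) (m : Int) : Decidable (Pre_foldHash key m) := by unfold Pre_foldHash; infer_instance
def pvWitness_foldHash : String × Int := ("abcde", 97)

def Spec_foldHash (key : String) (m : Int) (out : Int) : Prop := out = foldHash_alt key m
instance (key : String) (m : Int) (out : Int) : Decidable (Spec_foldHash key m out) := by unfold Spec_foldHash; infer_instance

-- ===== CLAIM (what is proved, stated in full; the proofs are below) =====
def Claim_equal_foldHash : Prop := ∀ (key : String) (m : Int), Dom_foldHash key m → Pre_foldHash key m → Spec_foldHash key m (foldHash key m)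

-- ===== LEMMAS AND PROOFS =====

-- reference sum: A's per-4-byte-group weighted sum, stated structurally on the list
def bsum : List Int → Int
  | a :: b :: c :: d :: t => a <<< (24:Nat) + b <<< (16:Nat) + c <<< (8:Nat) + d + bsum t
  | [a, b, c] => a <<< (24:Nat) + b <<< (16:Nat) + c <<< (8:Nat)
  | [a, b] => a <<< (24:Nat) + b <<< (16:Nat)
  | [a] => a <<< (24:Nat)
  | [] => 0

lemma foldHashLoop_eq_bsum (bs : List Int) (i : Nat) (acc : Int) :
    foldHashLoop bs i acc = acc + bsum (bs.drop i) := by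
  induction i, acc using foldHashLoop.induct bs with
  | case1 i acc h ih =>
    have hd : ∀ k : Nat, PySem.List.pyGet? bs ((i : Int) + k) = (bs.drop i)[k]? := by
      intro k
      have : (i : Int) + k = ((i + k : Nat) : Int) := by push_cast; ring
      rw [this, PySem.List.pyGet?_natCast, List.getElem?_drop]
    have h0 : PySem.List.pyGet? bs (i : Int) = (bs.drop i)[0]? := by simpa using hd 0
    have hd1 : PySem.List.pyGet? bs ((i : Int) + 1) = (bs.drop i)[1]? := by
      have := hd 1; push_cast at this; exact this
    have hd2 : PySem.List.pyGet? bs ((i : Int) + 2) = (bs.drop i)[2]? := by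
      have := hd 2; push_cast at this; exact this
    have hd3 : PySem.List.pyGet? bs ((i : Int) + 3) = (bs.drop i)[3]? := by
      have := hd 3; push_cast at this; exact this
    have hdrop : bs.drop (i + 4) = (bs.drop i).drop 4 := by
      simp [List.drop_drop]
    rw [foldHashLoop, dif_pos h, ih, h0, hd1, hd2, hd3, hdrop]
    rcases bs.drop i with _ | ⟨a, _ | ⟨b, _ | ⟨c, _ | ⟨d, t⟩⟩⟩⟩ <;>
      simp [bsum] <;> try ring
  | case2 i acc h =>
    have : bs.length ≤ i := by omega
    rw [foldHashLoop]
    simp [h, List.drop_of_length_le this, bsum]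

-- B's flat pass, with the enumeration starting at any multiple of 4, computes bsum
lemma foldB_eq_bsum (bs : List Int) (j : Int) (acc : Int) (hj : PySem.Int.mod j 4 = 0) :
    (PySem.List.enumerate bs j).foldl
      (fun (total : Int) (ib : Int × Int) => total + ib.2 <<< (((3 - PySem.Int.mod ib.1 4) * 8).toNat)) acc
    = acc + bsum bs := by
  have key4 : ∀ k : Int, PySem.Int.mod k 4 = k % 4 :=
    fun k => PySem.Int.mod_eq_emod_of_pos (by norm_num)
  rw [key4] at hj
  induction bs using bsum.induct generalizing j acc with
  | case1 a b c d t ih =>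
    have e0 : PySem.Int.mod j 4 = 0 := by rw [key4]; exact hj
    have e1 : PySem.Int.mod (j + 1) 4 = 1 := by rw [key4]; omega
    have e2 : PySem.Int.mod (j + 1 + 1) 4 = 2 := by rw [key4]; omega
    have e3 : PySem.Int.mod (j + 1 + 1 + 1) 4 = 3 := by rw [key4]; omega
    have e4 : (j + 1 + 1 + 1 + 1) % 4 = 0 := by omega
    simp only [PySem.List.enumerate, List.foldl, e0, e1, e2, e3]
    rw [ih _ _ e4, bsum]
    simp only [Int.shiftLeft_eq]
    simp
    ring
  | case2 a b c =>
    have e0 : PySem.Int.mod j 4 = 0 := by rw [key4]; exact hj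
    have e1 : PySem.Int.mod (j + 1) 4 = 1 := by rw [key4]; omega
    have e2 : PySem.Int.mod (j + 1 + 1) 4 = 2 := by rw [key4]; omega
    simp only [PySem.List.enumerate, List.foldl, e0, e1, e2, bsum, Int.shiftLeft_eq]
    simp
    try ring
  | case3 a b =>
    have e0 : PySem.Int.mod j 4 = 0 := by rw [key4]; exact hj
    have e1 : PySem.Int.mod (j + 1) 4 = 1 := by rw [key4]; omega
    simp only [PySem.List.enumerate, List.foldl, e0, e1, bsum, Int.shiftLeft_eq]
    simp
    try ring
  | case4 a =>
    have e0 : PySem.Int.mod j 4 = 0 := by rw [key4]; exact hj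
    simp only [PySem.List.enumerate, List.foldl, e0, bsum, Int.shiftLeft_eq]
    simp
    try ring
  | case5 =>
    simp [PySem.List.enumerate, bsum]

-- ===== VERDICT (by name: the statement is the Claim_ definition above) =====
theorem foldHash_spec : Claim_equal_foldHash := by
  intro key m _ _
  unfold Spec_foldHash foldHash foldHash_alt
  rw [foldHashLoop_eq_bsum, foldB_eq_bsum _ 0 0 (by decide)]
  simp
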